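-- pv_equiv track=rewrite | github.com/dlobasev/nanoclaw | container/skills/social-comment-hunt/search.py | rank_and_trim
-- ===== SOURCE A (Python) =====
-- POSTS_PER_SOURCE = 3
--
-- def rank_and_trim(posts: list) -> dict:
--     """Group by platform, trim to POSTS_PER_SOURCE each."""
--     by_platform = {}
--     for post in posts:
--         p = post["platform"]
--         by_platform.setdefault(p, []).append(post)
--
--     result = {}
--     for platform, items in by_platform.items():
--         result[platform] = items[:POSTS_PER_SOURCE]
--
--     return result
-- ===== SOURCE B (Python) =====
-- POSTS_PER_SOURCE = 3
--
-- def rank_and_trim(posts: list) -> dict: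
--     """Platform-first: distinct platforms in first-appearance order, then build
--     each trimmed bucket directly by filtering posts for that platform."""
--     platforms = dict.fromkeys(post["platform"] for post in posts)
--     return {p: [post for post in posts if post["platform"] == p][:POSTS_PER_SOURCE]
--             for p in platforms}
-- ===== Notes on version B (the rewrite author's own statement) =====
-- stated objective: alternative
-- what changed: Replaces A's accumulate-into-dict-of-lists-then-slice structure with a platform-first construction: dedup the platforms in first-appearance order, then build each trimmed bucket by filtering the posts for that platform; no mutable dict of growing lists is ever kept. Trades one grouping pass for a filter pass per distinct platform.
import Mathlib
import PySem

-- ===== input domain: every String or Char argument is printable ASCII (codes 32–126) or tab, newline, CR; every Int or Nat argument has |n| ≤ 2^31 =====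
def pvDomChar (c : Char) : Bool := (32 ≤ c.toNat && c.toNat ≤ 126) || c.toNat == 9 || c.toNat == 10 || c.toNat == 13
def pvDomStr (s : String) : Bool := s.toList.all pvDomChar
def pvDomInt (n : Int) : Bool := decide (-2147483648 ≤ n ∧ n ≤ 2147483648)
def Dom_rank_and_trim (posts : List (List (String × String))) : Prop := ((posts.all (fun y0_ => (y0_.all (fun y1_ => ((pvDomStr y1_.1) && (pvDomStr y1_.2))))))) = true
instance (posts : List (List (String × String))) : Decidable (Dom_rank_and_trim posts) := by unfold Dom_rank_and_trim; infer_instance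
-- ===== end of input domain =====

-- B builds the result platform-first (dedup the platforms in first-appearance order,
-- then filter+trim posts per platform) instead of A's accumulate-into-dict-then-slice
-- two-pass structure; objective: alternative (same result, different construction).


-- ===== PORT A =====
-- post["platform"] on the post dict (assoc list, first match); none = KeyError
def pvKeyOf? (post : List (String × String)) : Option String :=
  (PySem.Dict.mk post).get? "platform"

-- by_platform.setdefault(p, []).append(post)  ≡  d[p] = d.get(p, []) + [post]  = Dict.modify
def pvStepA (d : PySem.Dict String (List (List (String × String))))
    (post : List (String × String)) : PySem.Dict String (List (List (String × String))) :=
  match pvKeyOf? post with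
  | some p => d.modify p [] (· ++ [post])
  | none => d            -- KeyError in Python; outside Pre_, nothing claimed

def rank_and_trim (posts : List (List (String × String))) : List (String × List (List (String × String))) :=
  let by_platform := posts.foldl pvStepA PySem.Dict.empty
  let result := by_platform.items.foldl
    (fun r pi => r.insert pi.1 (pi.2.take 3)) PySem.Dict.empty   -- items[:POSTS_PER_SOURCE]
  result.items

-- ===== PORT B =====
-- platforms = dict.fromkeys(post["platform"] for post in posts)  — ordered dedup (PySem.List.dedup);
-- post["platform"] is pvKeyOf? again; a missing key (KeyError, outside Pre_) contributes nothing here.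
def rank_and_trim_alt (posts : List (List (String × String))) : List (String × List (List (String × String))) :=
  let platforms := PySem.List.dedup (posts.filterMap pvKeyOf?)
  platforms.map (fun p => (p, (posts.filter (fun post => pvKeyOf? post == some p)).take 3))

-- ===== PRECONDITION & SPEC =====
-- Pre_ excludes exactly the inputs where Python A raises KeyError: a post without a "platform" key.
def Pre_rank_and_trim (posts : List (List (String × String))) : Prop :=
  ∀ post ∈ posts, "platform" ∈ post.map Prod.fst
instance (posts : List (List (String × String))) : Decidable (Pre_rank_and_trim posts) := by
  unfold Pre_rank_and_trim; infer_instance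
def pvWitness_rank_and_trim : (List (List (String × String))) :=
  [[("platform", "reddit"), ("id", "1")], [("platform", "hn"), ("id", "2")]]

def Spec_rank_and_trim (posts : List (List (String × String))) (out : List (String × List (List (String × String)))) : Prop := out = rank_and_trim_alt posts
instance (posts : List (List (String × String))) (out : List (String × List (List (String × String)))) : Decidable (Spec_rank_and_trim posts out) := by unfold Spec_rank_and_trim; infer_instance

-- ===== CLAIM (what is proved, stated in full; the proofs are below) =====
def Claim_equal_rank_and_trim : Prop := ∀ (posts : List (List (String × String))), Dom_rank_and_trim posts → Pre_rank_and_trim posts → Spec_rank_and_trim posts (rank_and_trim posts)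

-- ===== LEMMAS AND PROOFS =====

-- the platform of a post, totalised (under Pre_ the key is present)
def pvKeyf (post : List (String × String)) : String := (pvKeyOf? post).getD ""

theorem pv_key_some (post : List (String × String)) (h : "platform" ∈ post.map Prod.fst) :
    pvKeyOf? post = some (pvKeyf post) := by
  unfold pvKeyf
  cases hk : pvKeyOf? post with
  | some k => rfl
  | none =>
      exfalso
      have := (PySem.Dict.get?_eq_none_iff_not_mem_keys (d := PySem.Dict.mk post) (k := "platform")).mp hk
      rw [PySem.Dict.keys_mk] at this
      exact this h

-- A's grouping fold, rewritten into the library's modify-append loop shape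
theorem pv_groupA (posts : List (List (String × String)))
    (hpre : ∀ post ∈ posts, "platform" ∈ post.map Prod.fst) :
    posts.foldl pvStepA PySem.Dict.empty
      = (posts.map (fun post => (pvKeyf post, post))).foldl
          (fun d p => d.modify p.1 [] (· ++ [p.2])) PySem.Dict.empty := by
  rw [List.foldl_map]
  apply PySem.List.foldl_congr_mem
  intro d post hmem
  simp [pvStepA, pv_key_some post (hpre post hmem)]

theorem pv_sub (posts : List (List (String × String)))
    (hpre : ∀ post ∈ posts, "platform" ∈ post.map Prod.fst) (p : String) :
    posts.filter (fun post => pvKeyOf? post == some p)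
      = posts.filter (fun post => pvKeyf post == p) := by
  apply List.filter_congr
  intro post hmem
  have h := pv_key_some post (hpre post hmem)
  simp [h]

-- ===== VERDICT (by name: the statement is the Claim_ definition above) =====
theorem rank_and_trim_spec : Claim_equal_rank_and_trim := by
  intro posts _ hpre
  unfold Spec_rank_and_trim rank_and_trim rank_and_trim_alt
  rw [pv_groupA posts hpre]
  set L := posts.map (fun post => (pvKeyf post, post)) with hL
  set G := L.foldl (fun d p => d.modify p.1 [] (· ++ [p.2])) PySem.Dict.empty with hG
  have hnd : G.keys.Nodup := by
    rw [hG]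
    exact PySem.Dict.nodup_keys_foldl_modify_key L Prod.fst []
      (fun d p => (· ++ [p.2])) PySem.Dict.empty (by simp [PySem.Dict.empty, PySem.Dict.keys])
  have hkeys : G.keys = PySem.Set.ofList (posts.map pvKeyf) := by
    rw [hG]
    have := PySem.Dict.keys_foldl_modify_key L Prod.fst []
      (fun d p => (· ++ [p.2])) PySem.Dict.empty
    rw [this]
    simp [PySem.Dict.empty, PySem.Dict.keys, PySem.Set.update_nil_left, hL,
      List.map_map, Function.comp_def]
  have hgetD : ∀ c, G.getD c [] = posts.filter (fun post => pvKeyf post == c) := by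
    intro c
    rw [hG, PySem.Dict.getD_foldl_modify_append]
    simp [PySem.Dict.empty, PySem.Dict.getD, PySem.Dict.get?, hL, List.filter_map,
      Function.comp_def, List.map_map]
  have hitems : G.items = (PySem.Set.ofList (posts.map pvKeyf)).map
      (fun k => (k, posts.filter (fun post => pvKeyf post == k))) := by
    rw [PySem.Dict.items_eq_map_keys G hnd [], hkeys]
    exact List.map_congr_left (fun k _ => by rw [hgetD k])
  -- the trimming pass appends fresh keys in order
  have hfresh : ((G.items.foldl (fun r pi => r.insert pi.1 (pi.2.take 3)) PySem.Dict.empty)).items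
      = G.items.map (fun pi => (pi.1, pi.2.take 3)) := by
    have := PySem.Dict.items_foldl_insert_fresh G.items Prod.fst (fun pi => pi.2.take 3)
      PySem.Dict.empty (by intro a _; rfl) (by simpa [PySem.Dict.keys] using hnd)
    simpa using this
  rw [hfresh, hitems, List.map_map]
  -- B side: its dedup'd platforms are the same list of keys, its filters the same buckets
  have hplat : PySem.List.dedup (posts.filterMap pvKeyOf?) = PySem.Set.ofList (posts.map pvKeyf) := by
    rw [PySem.List.dedup_eq_ofList]
    congr 1
    calc posts.filterMap pvKeyOf?
        = posts.filterMap (fun post => some (pvKeyf post)) :=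
          List.filterMap_congr (fun post hmem => pv_key_some post (hpre post hmem))
      _ = posts.map pvKeyf := by simp
  rw [hplat]
  apply List.map_congr_left
  intro p _
  simp [Function.comp, pv_sub posts hpre p]
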